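-- pv_equiv track=rewrite | github.com/paiml/depyler | examples/hard_dutch_flag.py | is_partitioned
-- ===== SOURCE A (Python) =====
-- def is_partitioned(arr: list[int], pivot: int) -> int:
--     """Check if array is partitioned around pivot. Returns 1 if yes, 0 if no."""
--     phase: int = 0
--     i: int = 0
--     length: int = len(arr)
--     while i < length:
--         if phase == 0:
--             if arr[i] == pivot:
--                 phase = 1
--             elif arr[i] > pivot:
--                 phase = 2
--         elif phase == 1:
--             if arr[i] < pivot:
--                 return 0
--             elif arr[i] > pivot:
--                 phase = 2
--         else:
--             if arr[i] <= pivot: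
--                 return 0
--         i = i + 1
--     return 1
-- ===== SOURCE B (Python) =====
-- def is_partitioned(arr: list[int], pivot: int) -> int:
--     """Check if array is partitioned around pivot. Returns 1 if yes, 0 if no."""
--     cats = [0 if x < pivot else 1 if x == pivot else 2 for x in arr]
--     return 1 if all(a <= b for a, b in zip(cats, cats[1:])) else 0
-- ===== Notes on version B (the rewrite author's own statement) =====
-- stated objective: simpler
-- what changed: Replaces the three-state phase automaton with a classification pass (each element mapped to category 0/1/2) followed by a check that the category sequence is non-decreasing.
import Mathlib
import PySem

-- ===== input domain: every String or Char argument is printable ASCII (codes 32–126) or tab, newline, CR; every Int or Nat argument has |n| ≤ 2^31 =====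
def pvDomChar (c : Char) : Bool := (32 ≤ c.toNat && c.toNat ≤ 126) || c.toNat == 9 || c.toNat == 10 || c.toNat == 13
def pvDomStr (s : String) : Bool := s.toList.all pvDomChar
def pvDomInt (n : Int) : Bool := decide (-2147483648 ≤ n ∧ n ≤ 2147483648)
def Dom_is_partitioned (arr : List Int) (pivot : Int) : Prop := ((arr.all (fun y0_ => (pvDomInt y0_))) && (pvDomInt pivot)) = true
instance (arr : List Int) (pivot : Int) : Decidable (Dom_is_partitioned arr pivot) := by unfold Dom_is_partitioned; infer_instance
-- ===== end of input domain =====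

-- B replaces A's three-state phase automaton by classifying each element into a
-- category 0/1/2 and checking the category sequence is non-decreasing (objective: simpler).

-- ===== PORT A =====
-- the while loop over indices becomes structural recursion over the list, carrying `phase`
def pvGoA (pivot : Int) : Int → List Int → Int
  | _, [] => 1
  | phase, x :: rest =>
    if phase = 0 then
      if x = pivot then pvGoA pivot 1 rest
      else if x > pivot then pvGoA pivot 2 rest
      else pvGoA pivot 0 rest
    else if phase = 1 then
      if x < pivot then 0
      else if x > pivot then pvGoA pivot 2 rest
      else pvGoA pivot 1 rest
    else
      if x ≤ pivot then 0 else pvGoA pivot phase rest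

def is_partitioned (arr : List Int) (pivot : Int) : Int := pvGoA pivot 0 arr

-- ===== PORT B =====
def pvCat (pivot x : Int) : Int := if x < pivot then 0 else if x = pivot then 1 else 2

def is_partitioned_alt (arr : List Int) (pivot : Int) : Int :=
  let cats := arr.map (pvCat pivot)
  if (cats.zip cats.tail).all (fun p => decide (p.1 ≤ p.2)) then 1 else 0

-- ===== PRECONDITION & SPEC =====
def Spec_is_partitioned (arr : List Int) (pivot : Int) (out : Int) : Prop := out = is_partitioned_alt arr pivot
instance (arr : List Int) (pivot : Int) (out : Int) : Decidable (Spec_is_partitioned arr pivot out) := by unfold Spec_is_partitioned; infer_instance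

-- ===== CLAIM (what is proved, stated in full; the proofs are below) =====
def Claim_equal_is_partitioned : Prop := ∀ (arr : List Int) (pivot : Int), Dom_is_partitioned arr pivot → Spec_is_partitioned arr pivot (is_partitioned arr pivot)

-- ===== LEMMAS AND PROOFS =====

-- adjacent-pair check over a category list, with the previous category carried explicitly
def pvChk (p : Int) : List Int → Bool
  | [] => true
  | c :: cs => !(c < p) && pvChk c cs

lemma pvCat_mem (pivot x : Int) : pvCat pivot x = 0 ∨ pvCat pivot x = 1 ∨ pvCat pivot x = 2 := by
  unfold pvCat; split_ifs <;> simp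

lemma pvCat_nonneg (pivot x : Int) : 0 ≤ pvCat pivot x := by
  unfold pvCat; split_ifs <;> norm_num

-- A's automaton step: for phases 0/1/2 the step is "fail if category drops, else the new phase is the category"
lemma pvGoA_step (pivot p y : Int) (l : List Int) (hp : p = 0 ∨ p = 1 ∨ p = 2) :
    pvGoA pivot p (y :: l) =
      if pvCat pivot y < p then 0 else pvGoA pivot (pvCat pivot y) l := by
  rcases hp with h | h | h <;> subst h <;>
    simp only [pvGoA, pvCat] <;> split_ifs <;> first | rfl | omega

lemma pvGoA_eq_chk (pivot : Int) (l : List Int) :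
    ∀ p, p = 0 ∨ p = 1 ∨ p = 2 →
      pvGoA pivot p l = if pvChk p (l.map (pvCat pivot)) then 1 else 0 := by
  induction l with
  | nil => intro p _; simp [pvGoA, pvChk]
  | cons y l ih =>
    intro p hp
    rw [pvGoA_step pivot p y l hp]
    simp only [List.map, pvChk]
    by_cases h : pvCat pivot y < p
    · simp [h]
    · simp [h, ih (pvCat pivot y) (pvCat_mem pivot y)]

lemma pvChk_eq_zipAll (cs : List Int) :
    ∀ c, pvChk c cs = ((c :: cs).zip cs).all (fun p => decide (p.1 ≤ p.2)) := by
  induction cs with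
  | nil => intro c; simp [pvChk]
  | cons c' cs ih =>
    intro c
    simp only [pvChk, List.zip_cons_cons, List.all_cons, ← ih c']
    by_cases h : c' < c
    · simp [h]
    · simp [h]; omega

-- ===== VERDICT (by name: the statement is the Claim_ definition above) =====
theorem is_partitioned_spec : Claim_equal_is_partitioned := by
  intro arr pivot _
  unfold Spec_is_partitioned is_partitioned is_partitioned_alt
  rw [pvGoA_eq_chk pivot arr 0 (Or.inl rfl)]
  cases arr with
  | nil => simp [pvChk]
  | cons x l =>
    have h0 : ¬ pvCat pivot x < 0 := not_lt.mpr (pvCat_nonneg pivot x)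
    have h1 : pvChk 0 (pvCat pivot x :: l.map (pvCat pivot)) =
        ((pvCat pivot x :: l.map (pvCat pivot)).zip (l.map (pvCat pivot))).all
          (fun p => decide (p.1 ≤ p.2)) := by
      rw [← pvChk_eq_zipAll]; simp [pvChk, h0]
    exact if_congr (by simp only [List.map_cons, List.tail_cons]; rw [h1]) rfl rfl
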